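-- pv_equiv track=rewrite | github.com/daniel-reich/ubiquitous-fiesta | 437h8sNsWAPCcMRSg_13.py | product_of_primes
-- ===== SOURCE A (Python) =====
-- def product_of_primes(num):
--   a,n=0,2
--   p=[x for x in range(num) if all(x%i for i in range(2,x))]
--   while n<len(p):
--     for m in range(n,len(p)):
--       if p[n]*p[m]==num:
--         a=a+1
--     n=n+1
--   return a!=0
-- ===== SOURCE B (Python) =====
-- def _is_prime(k):
--     if k < 2:
--         return False
--     d = 2
--     while d * d <= k:
--         if k % d == 0:
--             return False
--         d += 1
--     return True
--
-- def product_of_primes(num):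
--     if num < 4:
--         return False
--     d = 2
--     while d * d <= num:
--         if num % d == 0:
--             return _is_prime(num // d)
--         d += 1
--     return False
-- ===== Notes on version B (the rewrite author's own statement) =====
-- stated objective: faster
-- what changed: Instead of building the full list of primes below num by quadratic trial division and scanning all pairs, B finds the smallest divisor d of num by trial division up to sqrt(num) and checks that num//d is prime.
import Mathlib
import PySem

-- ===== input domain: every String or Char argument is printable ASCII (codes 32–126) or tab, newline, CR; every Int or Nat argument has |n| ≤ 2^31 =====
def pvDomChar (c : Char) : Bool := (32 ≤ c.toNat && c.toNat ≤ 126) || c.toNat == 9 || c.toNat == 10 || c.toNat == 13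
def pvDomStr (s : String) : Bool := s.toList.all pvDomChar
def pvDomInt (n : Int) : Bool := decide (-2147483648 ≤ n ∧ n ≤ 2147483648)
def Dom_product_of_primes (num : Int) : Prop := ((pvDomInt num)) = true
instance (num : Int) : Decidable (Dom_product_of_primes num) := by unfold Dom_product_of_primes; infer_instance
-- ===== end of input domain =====

-- B replaces A's quadratic prime-list plus pairwise product scan by trial division up to sqrt(num):
-- find the smallest divisor d ≥ 2 of num and check that num // d is prime.

-- ===== PORT A =====
-- p = [x for x in range(num) if all(x%i for i in range(2,x))]
def pvPListA (num : Int) : List Int :=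
  (PySem.List.pyRange 0 num 1).filter
    (fun x => (PySem.List.pyRange 2 x 1).all (fun i => PySem.Int.mod x i != 0))

-- while n < len(p): for m in range(n, len(p)): if p[n]*p[m]==num: a = a+1 ; n = n+1
def pvLoopA (p : List Int) (num : Int) (n : Nat) (a : Int) : Int :=
  if _h : n < p.length then
    pvLoopA p num (n + 1)
      ((PySem.List.pyRange (n : Int) (PySem.List.len p) 1).foldl
        (fun a m => if PySem.List.pyGetD p (n : Int) 0 * PySem.List.pyGetD p m 0 == num then a + 1 else a) a)
  else a
termination_by p.length - n

def product_of_primes (num : Int) : Bool :=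
  pvLoopA (pvPListA num) num 2 0 != 0

-- ===== PORT B =====
-- _is_prime's while loop; B only ever runs it on nonnegative values (num ≥ 4 is checked first),
-- so the loop state is carried as Nat, on which Python's %, //, <= coincide with Nat's.
def pvIsPrimeAux (k d : Nat) : Bool :=
  if _h : d * d ≤ k then
    (if k % d == 0 then false else pvIsPrimeAux k (d + 1))
  else true
termination_by k + 2 - d
decreasing_by
  have hdd : d ≤ d * d := by
    cases d with
    | zero => simp
    | succ n => exact Nat.le_mul_of_pos_left _ (Nat.succ_pos n)
  omega

def pvIsPrime (k : Nat) : Bool := if k < 2 then false else pvIsPrimeAux k 2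

-- the main while loop of B
def pvSemiAux (n d : Nat) : Bool :=
  if _h : d * d ≤ n then
    (if n % d == 0 then pvIsPrime (n / d) else pvSemiAux n (d + 1))
  else false
termination_by n + 2 - d
decreasing_by
  have hdd : d ≤ d * d := by
    cases d with
    | zero => simp
    | succ n => exact Nat.le_mul_of_pos_left _ (Nat.succ_pos n)
  omega

def product_of_primes_alt (num : Int) : Bool :=
  if num < 4 then false else pvSemiAux num.toNat 2

-- ===== PRECONDITION & SPEC =====
def Spec_product_of_primes (num : Int) (out : Bool) : Prop := out = product_of_primes_alt num
instance (num : Int) (out : Bool) : Decidable (Spec_product_of_primes num out) := by unfold Spec_product_of_primes; infer_instance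

-- ===== CLAIM (what is proved, stated in full; the proofs are below) =====
def Claim_equal_product_of_primes : Prop := ∀ (num : Int), Dom_product_of_primes num → Spec_product_of_primes num (product_of_primes num)

-- ===== LEMMAS AND PROOFS =====

-- both programs decide this proposition: num is a product of two primes
def pvSemiprime (num : Int) : Prop :=
  ∃ q r : ℕ, Nat.Prime q ∧ Nat.Prime r ∧ ((q * r : ℕ) : ℤ) = num

-- ---- B side ----

theorem pvIsPrimeAux_iff (k d : Nat) :
    2 ≤ d → (pvIsPrimeAux k d = true ↔ ∀ i, d ≤ i → i * i ≤ k → ¬ i ∣ k) := by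
  induction d using pvIsPrimeAux.induct (k := k) with
  | case1 d h hmod =>
    intro hd
    rw [pvIsPrimeAux, dif_pos h, if_pos hmod]
    constructor
    · intro hfalse; exact absurd hfalse Bool.false_ne_true
    · intro hall
      exact (hall d le_rfl h (Nat.dvd_of_mod_eq_zero (by simpa using hmod))).elim
  | case2 d h hmod ih =>
    intro hd
    rw [pvIsPrimeAux, dif_pos h, if_neg hmod, ih (by omega)]
    constructor
    · intro hall i hdi hii hdvd
      rcases Nat.eq_or_lt_of_le hdi with rfl | hlt
      · exact absurd (Nat.mod_eq_zero_of_dvd hdvd) (by simpa using hmod)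
      · exact hall i hlt hii hdvd
    · intro hall i hdi hii hdvd
      exact hall i (by omega) hii hdvd
  | case3 d h =>
    intro hd
    rw [pvIsPrimeAux, dif_neg h]
    constructor
    · intro _ i hdi hii hdvd
      exact h (le_trans (Nat.mul_le_mul hdi hdi) hii)
    · intro _; rfl

theorem pvIsPrime_iff (k : Nat) : pvIsPrime k = true ↔ Nat.Prime k := by
  unfold pvIsPrime
  by_cases hk : k < 2
  · simp only [hk, if_true]
    constructor
    · intro hfalse; exact absurd hfalse Bool.false_ne_true
    · intro hp; exact absurd hp.two_le (by omega)
  · simp only [hk, if_false]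
    rw [pvIsPrimeAux_iff k 2 le_rfl, Nat.prime_def_le_sqrt]
    constructor
    · intro hall
      exact ⟨by omega, fun m hm hms => hall m hm (Nat.le_sqrt.mp hms)⟩
    · intro ⟨_, hall⟩ i hi hii
      exact hall i hi (Nat.le_sqrt.mpr hii)

theorem pvSemiAux_iff (n d : Nat) :
    2 ≤ d → (∀ i, 2 ≤ i → i < d → ¬ i ∣ n) →
    (pvSemiAux n d = true ↔ ∃ p q : ℕ, Nat.Prime p ∧ Nat.Prime q ∧ d ≤ p ∧ p ≤ q ∧ p * q = n) := by
  induction d using pvSemiAux.induct (n := n) with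
  | case1 d h hmod =>
    intro hd hinv
    have hdvd : d ∣ n := Nat.dvd_of_mod_eq_zero (by simpa using hmod)
    have hdprime : Nat.Prime d := by
      rw [Nat.prime_def_lt]
      refine ⟨hd, fun m hm hmd => ?_⟩
      by_contra hm1
      have hm0 : m ≠ 0 := by
        rintro rfl
        have := Nat.eq_zero_of_zero_dvd hmd
        omega
      exact hinv m (by omega) hm (hmd.trans hdvd)
    rw [pvSemiAux, dif_pos h, if_pos hmod, pvIsPrime_iff]
    constructor
    · intro hq
      refine ⟨d, n / d, hdprime, hq, le_rfl, ?_, Nat.mul_div_cancel' hdvd⟩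
      exact (Nat.le_div_iff_mul_le (by omega)).mpr h
    · rintro ⟨p, q, hp, hq, hdp, hpq, rfl⟩
      rcases (Nat.Prime.dvd_mul hdprime).mp hdvd with hdp' | hdq'
      · have : d = p := ((Nat.prime_dvd_prime_iff_eq hdprime hp).mp hdp')
        subst this
        rwa [Nat.mul_div_cancel_left _ (by omega)]
      · have : d = q := ((Nat.prime_dvd_prime_iff_eq hdprime hq).mp hdq')
        subst this
        have : p = d := le_antisymm hpq hdp
        subst this
        rwa [Nat.mul_div_cancel _ (by omega)]
  | case2 d h hmod ih =>
    intro hd hinv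
    rw [pvSemiAux, dif_pos h, if_neg hmod]
    have hndvd : ¬ d ∣ n := fun hdvd => by
      have := Nat.mod_eq_zero_of_dvd hdvd
      simp [this] at hmod
    rw [ih (by omega) (fun i h2 hilt hdvd => by
      rcases Nat.lt_succ_iff_lt_or_eq.mp hilt with hlt | rfl
      · exact hinv i h2 hlt hdvd
      · exact hndvd hdvd)]
    constructor
    · rintro ⟨p, q, hp, hq, hdp, hpq, hmul⟩
      exact ⟨p, q, hp, hq, by omega, hpq, hmul⟩
    · rintro ⟨p, q, hp, hq, hdp, hpq, hmul⟩
      refine ⟨p, q, hp, hq, ?_, hpq, hmul⟩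
      rcases Nat.eq_or_lt_of_le hdp with rfl | hlt
      · exact absurd ⟨q, hmul.symm⟩ hndvd
      · omega
  | case3 d h =>
    intro hd hinv
    rw [pvSemiAux, dif_neg h]
    constructor
    · intro hfalse; exact absurd hfalse Bool.false_ne_true
    · rintro ⟨p, q, hp, hq, hdp, hpq, rfl⟩
      exact (h (Nat.mul_le_mul hdp (le_trans hdp hpq))).elim

theorem pvAlt_iff (num : Int) : product_of_primes_alt num = true ↔ pvSemiprime num := by
  unfold product_of_primes_alt
  by_cases h4 : num < 4
  · simp only [h4, if_true]
    constructor
    · intro hfalse; exact absurd hfalse Bool.false_ne_true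
    · rintro ⟨q, r, hq, hr, hqr⟩
      have h2q := hq.two_le
      have h2r := hr.two_le
      have : 4 ≤ q * r := Nat.mul_le_mul h2q h2r
      omega
  · simp only [h4, if_false]
    rw [pvSemiAux_iff num.toNat 2 le_rfl (fun i h2 hi => by omega)]
    constructor
    · rintro ⟨p, q, hp, hq, _, _, hmul⟩
      exact ⟨p, q, hp, hq, by rw [hmul]; omega⟩
    · rintro ⟨q, r, hq, hr, hqr⟩
      have hn : q * r = num.toNat := by omega
      rcases le_total q r with hle | hle
      · exact ⟨q, r, hq, hr, hq.two_le, hle, hn⟩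
      · exact ⟨r, q, hr, hq, hr.two_le, hle, by rw [Nat.mul_comm]; exact hn⟩

-- ---- A side ----

theorem mem_pvPListA (num x : Int) :
    x ∈ pvPListA num ↔ 0 ≤ x ∧ x < num ∧ ∀ i : ℤ, 2 ≤ i → i < x → ¬ i ∣ x := by
  unfold pvPListA
  rw [List.mem_filter]
  simp only [List.all_eq_true, PySem.List.mem_pyRange_one, bne_iff_ne, ne_eq]
  constructor
  · rintro ⟨⟨h0, hn⟩, hall⟩
    refine ⟨h0, hn, fun i h2 hix hdvd => ?_⟩
    exact hall i ⟨h2, hix⟩ ((PySem.Int.mod_eq_zero_iff_dvd x i).mpr hdvd)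
  · rintro ⟨h0, hn, hall⟩
    refine ⟨⟨h0, hn⟩, fun i ⟨h2, hix⟩ hmod => ?_⟩
    exact hall i h2 hix ((PySem.Int.mod_eq_zero_iff_dvd x i).mp hmod)

theorem pvPredA_prime (x : Int) (hx : 2 ≤ x) :
    (∀ i : ℤ, 2 ≤ i → i < x → ¬ i ∣ x) ↔ Nat.Prime x.toNat := by
  rw [Nat.prime_def_lt]
  constructor
  · intro hall
    refine ⟨by omega, fun m hm hmd => ?_⟩
    by_contra hm1
    have hm0 : m ≠ 0 := by
      rintro rfl
      have := Nat.eq_zero_of_zero_dvd hmd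
      omega
    refine hall (m : ℤ) (by omega) (by omega) ?_
    have : (m : ℤ) ∣ (x.toNat : ℤ) := Int.natCast_dvd_natCast.mpr hmd
    rwa [Int.toNat_of_nonneg (by omega)] at this
  · rintro ⟨_, hall⟩ i h2 hix hdvd
    have hi0 : 0 ≤ i := by omega
    have : i.toNat ∣ x.toNat := by
      rw [← Int.natCast_dvd_natCast, Int.toNat_of_nonneg hi0, Int.toNat_of_nonneg (by omega)]
      exact hdvd
    have := hall i.toNat (by omega) this
    omega

theorem pairwise_pvPListA (num : Int) : (pvPListA num).Pairwise (· < ·) :=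
  List.Pairwise.filter _ (PySem.List.pairwise_lt_pyRange_one 0 num)

theorem pvLoopA_ne (p : List Int) (num : Int) (n : Nat) (a : Int) :
    0 ≤ a →
    ((pvLoopA p num n a ≠ 0) ↔
      (a ≠ 0 ∨ ∃ n' m : Nat, n ≤ n' ∧ n' ≤ m ∧ m < p.length ∧ p.getD n' 0 * p.getD m 0 = num)) := by
  induction n, a using pvLoopA.induct (p := p) (num := num) with
  | case1 n a h ih =>
    intro ha
    rw [pvLoopA, dif_pos h]
    simp only [dite_eq_ite] at ih
    rw [PySem.List.foldl_count_if] at ih ⊢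
    set c : Nat := List.countP
      (fun m => PySem.List.pyGetD p (↑n) 0 * PySem.List.pyGetD p m 0 == num)
      (PySem.List.pyRange (↑n) (PySem.List.len p) 1) with hc
    rw [ih (by positivity)]
    have hcount : c ≠ 0 ↔
        ∃ m : Nat, n ≤ m ∧ m < p.length ∧ p.getD n 0 * p.getD m 0 = num := by
      rw [hc, ne_eq, List.countP_eq_zero]
      push Not
      constructor
      · rintro ⟨mi, hmem, hcond⟩
        rw [PySem.List.mem_pyRange_one, PySem.List.len_eq] at hmem
        refine ⟨mi.toNat, by omega, by omega, ?_⟩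
        have hmi : (mi.toNat : Int) = mi := Int.toNat_of_nonneg (by omega)
        rw [← hmi, PySem.List.pyGetD_natCast, PySem.List.pyGetD_natCast] at hcond
        simpa using hcond
      · rintro ⟨m, hnm, hml, heq⟩
        refine ⟨(m : Int), ?_, ?_⟩
        · rw [PySem.List.mem_pyRange_one, PySem.List.len_eq]
          constructor <;> omega
        · rw [PySem.List.pyGetD_natCast, PySem.List.pyGetD_natCast]
          simpa using heq
    constructor
    · rintro (hne | ⟨n', m, hn', hm, hml, heq⟩)
      · rcases (by omega : a ≠ 0 ∨ (c : Int) ≠ 0) with h' | h'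
        · exact Or.inl h'
        · rcases hcount.mp (by exact_mod_cast h') with ⟨m, hnm, hml, heq⟩
          exact Or.inr ⟨n, m, le_rfl, hnm, hml, heq⟩
      · exact Or.inr ⟨n', m, by omega, hm, hml, heq⟩
    · rintro (hne | ⟨n', m, hn', hm, hml, heq⟩)
      · exact Or.inl (by omega)
      · rcases Nat.eq_or_lt_of_le hn' with rfl | hlt
        · have : c ≠ 0 := hcount.mpr ⟨m, hm, hml, heq⟩
          exact Or.inl (by omega)
        · exact Or.inr ⟨n', m, by omega, hm, hml, heq⟩
  | case2 n a h =>
    intro ha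
    rw [pvLoopA, dif_neg h]
    constructor
    · exact Or.inl
    · rintro (hne | ⟨n', m, hn', hm, hml, _⟩)
      · exact hne
      · omega

theorem pvA_iff (num : Int) : product_of_primes num = true ↔ pvSemiprime num := by
  unfold product_of_primes
  rw [bne_iff_ne, pvLoopA_ne _ num 2 0 le_rfl]
  set p := pvPListA num with hp
  have hpair := pairwise_pvPListA num
  have hmono : ∀ i j : Nat, ∀ (hi : i < p.length) (hj : j < p.length), i < j → p[i] < p[j] :=
    fun i j hi hj hij => List.pairwise_iff_getElem.mp hpair i j hi hj hij
  constructor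
  · rintro (hne | ⟨n', m, hn', hm, hml, heq⟩)
    · exact absurd rfl hne
    · have hn'l : n' < p.length := by omega
      rw [List.getD_eq_getElem _ _ hn'l, List.getD_eq_getElem _ _ hml] at heq
      have hx := (mem_pvPListA num p[n']).mp (List.getElem_mem hn'l)
      have hy := (mem_pvPListA num p[m]).mp (List.getElem_mem hml)
      have h0l : 0 < p.length := by omega
      have h1l : 1 < p.length := by omega
      have h0 := (mem_pvPListA num p[0]).mp (List.getElem_mem h0l)
      have h1 := (mem_pvPListA num p[1]).mp (List.getElem_mem h1l)
      have h01 : p[0] < p[1] := hmono 0 1 h0l h1l (by omega)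
      have h1n : p[1] < p[n'] := hmono 1 n' h1l hn'l (by omega)
      have hxn : 2 ≤ p[n'] := by omega
      have hnm' : p[n'] ≤ p[m] := by
        rcases Nat.eq_or_lt_of_le hm with rfl | hlt
        · exact le_rfl
        · exact le_of_lt (hmono n' m hn'l hml hlt)
      have hyn : 2 ≤ p[m] := by omega
      refine ⟨p[n'].toNat, p[m].toNat, ?_, ?_, ?_⟩
      · exact (pvPredA_prime _ hxn).mp hx.2.2
      · exact (pvPredA_prime _ hyn).mp hy.2.2
      · push_cast
        rw [Int.toNat_of_nonneg (by omega), Int.toNat_of_nonneg (by omega)]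
        exact heq
  · rintro ⟨q0, r0, hq0, hr0, hqr⟩
    -- order the two primes
    obtain ⟨q, r, hq, hr, hle, hqr⟩ : ∃ q r : ℕ, Nat.Prime q ∧ Nat.Prime r ∧ q ≤ r ∧
        ((q * r : ℕ) : ℤ) = num := by
      rcases le_total q0 r0 with h | h
      · exact ⟨q0, r0, hq0, hr0, h, hqr⟩
      · exact ⟨r0, q0, hr0, hq0, h, by rw [Nat.mul_comm]; exact hqr⟩
    have h2q := hq.two_le
    have h2r := hr.two_le
    have hnum : 4 ≤ num := by
      have : 4 ≤ q * r := Nat.mul_le_mul h2q h2r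
      omega
    have hqlt : q < q * r := by nlinarith
    have hrlt : r < q * r := by nlinarith
    have hxm : (q : ℤ) ∈ p := by
      rw [mem_pvPListA]
      refine ⟨by omega, by omega, ?_⟩
      rw [pvPredA_prime _ (by omega)]
      simpa using hq
    have hym : (r : ℤ) ∈ p := by
      rw [mem_pvPListA]
      refine ⟨by omega, by omega, ?_⟩
      rw [pvPredA_prime _ (by omega)]
      simpa using hr
    have h0m : (0 : ℤ) ∈ p := by
      rw [mem_pvPListA]
      exact ⟨le_rfl, by omega, fun i h2 hi => by omega⟩
    have h1m : (1 : ℤ) ∈ p := by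
      rw [mem_pvPListA]
      exact ⟨by omega, by omega, fun i h2 hi => by omega⟩
    obtain ⟨i, hi, hieq⟩ := List.mem_iff_getElem.mp hxm
    obtain ⟨j, hj, hjeq⟩ := List.mem_iff_getElem.mp hym
    obtain ⟨i0, hi0, hi0eq⟩ := List.mem_iff_getElem.mp h0m
    obtain ⟨i1, hi1, hi1eq⟩ := List.mem_iff_getElem.mp h1m
    -- indices respect the value order because p is strictly sorted
    have hlt_of_val : ∀ u v : Nat, ∀ (hu : u < p.length) (hv : v < p.length),
        p[u] < p[v] → u < v := by
      intro u v hu hv hval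
      rcases Nat.lt_trichotomy u v with h | rfl | h
      · exact h
      · omega
      · exact absurd (hmono v u hv hu h) (by omega)
    have hi0i : i0 < i := hlt_of_val i0 i hi0 hi (by rw [hi0eq, hieq]; exact_mod_cast by omega)
    have hi1i : i1 < i := hlt_of_val i1 i hi1 hi (by rw [hi1eq, hieq]; exact_mod_cast by omega)
    have hi01 : i0 < i1 := hlt_of_val i0 i1 hi0 hi1 (by rw [hi0eq, hi1eq]; omega)
    have hij : i ≤ j := by
      by_contra hji
      have := hmono j i hj hi (by omega)
      rw [hieq, hjeq] at this
      exact_mod_cast absurd this (by push Not; exact_mod_cast hle)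
    refine Or.inr ⟨i, j, by omega, hij, hj, ?_⟩
    rw [List.getD_eq_getElem _ _ hi, List.getD_eq_getElem _ _ hj, hieq, hjeq]
    push_cast at hqr ⊢
    exact hqr

-- ===== VERDICT (by name: the statement is the Claim_ definition above) =====
theorem product_of_primes_spec : Claim_equal_product_of_primes := by
  intro num _
  unfold Spec_product_of_primes
  rw [Bool.eq_iff_iff, pvA_iff, pvAlt_iff]
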